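-- pv_equiv track=rewrite | github.com/live-wire/aoc | 2023/14/14.py | tilt_vec
-- ===== SOURCE A (Python) =====
-- def tilt_vec(vec):
--     ret = vec[:]
--     anchor = -1
--     balls = 0
--     r = 0
--     while r < len(vec):
--         if vec[r] == "#":
--             a = anchor + 1
--             for _ in range(balls):
--                 ret[a] = "O"
--                 a += 1
--             while a < r:
--                 ret[a] = "."
--                 a += 1
--             anchor = r
--             balls = 0
--         elif vec[r] == "O":
--             balls += 1
--         else:
--             pass
--         r += 1
--     a = anchor + 1
--     for _ in range(balls):
--         ret[a] = "O"
--         a += 1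
--     while a < r:
--         ret[a] = "."
--         a += 1
--     return ret
-- ===== SOURCE B (Python) =====
-- def tilt_vec(vec):
--     ret = ["#" if c == "#" else "." for c in vec]
--     free = 0
--     for i, c in enumerate(vec):
--         if c == "#":
--             free = i + 1
--         elif c == "O":
--             ret[free] = "O"
--             free += 1
--     return ret
-- ===== Notes on version B (the rewrite author's own statement) =====
-- stated objective: alternative
-- what changed: B first pre-blanks the whole row (walls kept, everything else '.') and then does a scatter pass placing each ball immediately at a write pointer reset after every wall, instead of A's counting balls per segment and flushing runs of 'O'/'.' into a copy at each wall.
import Mathlib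
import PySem

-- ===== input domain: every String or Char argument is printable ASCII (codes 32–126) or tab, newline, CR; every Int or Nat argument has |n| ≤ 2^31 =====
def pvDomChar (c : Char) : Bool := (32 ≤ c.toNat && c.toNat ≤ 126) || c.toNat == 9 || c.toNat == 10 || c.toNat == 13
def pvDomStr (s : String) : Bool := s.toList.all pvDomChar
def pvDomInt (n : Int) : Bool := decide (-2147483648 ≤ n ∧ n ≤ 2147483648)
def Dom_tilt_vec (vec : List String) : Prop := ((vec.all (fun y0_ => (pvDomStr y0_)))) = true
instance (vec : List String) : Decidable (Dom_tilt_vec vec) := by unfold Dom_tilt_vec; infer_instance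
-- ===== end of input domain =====

-- B pre-blanks the row and then scatters each ball at a write pointer reset after every wall,
-- instead of A's per-segment ball counting with run flushes at walls; objective: alternative, same O(n).

-- ===== PORT A =====
-- A writes into a copy of the input by position; all indices written are in range
-- (a runs from anchor+1 ≥ 0 up to r ≤ len), so List.set matches Python assignment.
def fillO (ret : List String) (a : Nat) (balls : Nat) : List String × Nat :=
  match balls with
  | 0 => (ret, a)
  | Nat.succ b => fillO (ret.set a "O") (a + 1) b

-- Python's `while a < r` loop, run on its iteration count r - a (structural recursion).
def fillDotGo (ret : List String) (a : Nat) : Nat → List String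
  | 0 => ret
  | Nat.succ k => fillDotGo (ret.set a ".") (a + 1) k

def fillDot (ret : List String) (a r : Nat) : List String := fillDotGo ret a (r - a)

-- Python's `while r < len(vec)` loop, run on its iteration count len - r (structural recursion).
def tiltA_go (vec ret : List String) (anchor : Int) (balls : Nat) (r : Nat) : Nat → List String
  | 0 =>
    let p := fillO ret (anchor + 1).toNat balls
    fillDot p.1 p.2 r
  | Nat.succ n =>
    if vec.getD r "" = "#" then
      let p := fillO ret (anchor + 1).toNat balls
      tiltA_go vec (fillDot p.1 p.2 r) (Int.ofNat r) 0 (r + 1) n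
    else if vec.getD r "" = "O" then
      tiltA_go vec ret anchor (balls + 1) (r + 1) n
    else
      tiltA_go vec ret anchor balls (r + 1) n

def tilt_vec (vec : List String) : List String := tiltA_go vec vec (-1) 0 0 vec.length

-- ===== PORT B =====
-- B: pre-blank (walls stay, everything else '.'), then one scatter pass writing each ball
-- at the write pointer `free`, which resets to i+1 after a wall. `free ≤ i` always, so the
-- List.set matches Python's in-range assignment.
def blankC (c : String) : String := if c = "#" then "#" else "."

def placeGo (ret : List String) (free i : Nat) (rest : List String) : List String :=
  match rest with
  | [] => ret
  | c :: cs =>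
    if c = "#" then placeGo ret (i + 1) (i + 1) cs
    else if c = "O" then placeGo (ret.set free "O") (free + 1) (i + 1) cs
    else placeGo ret free (i + 1) cs

def tilt_vec_alt (vec : List String) : List String := placeGo (vec.map blankC) 0 0 vec

-- ===== PRECONDITION & SPEC =====
def Spec_tilt_vec (vec : List String) (out : List String) : Prop := out = tilt_vec_alt vec
instance (vec : List String) (out : List String) : Decidable (Spec_tilt_vec vec out) := by unfold Spec_tilt_vec; infer_instance

-- ===== CLAIM (what is proved, stated in full; the proofs are below) =====
def Claim_equal_tilt_vec : Prop := ∀ (vec : List String), Dom_tilt_vec vec → Spec_tilt_vec vec (tilt_vec vec)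

-- ===== LEMMAS AND PROOFS =====

-- Canonical segment-wise form both ports are reduced to (proof-only helper).
def flushC (buf : List String) : List String :=
  List.replicate (buf.count "O") "O" ++ List.replicate (buf.length - buf.count "O") "."

def tiltC (out buf rest : List String) : List String :=
  match rest with
  | [] => out ++ flushC buf
  | c :: cs =>
    if c = "#" then tiltC (out ++ flushC buf ++ ["#"]) [] cs
    else tiltC out (buf ++ [c]) cs

lemma take_set_succ (l : List String) (x : String) (a : Nat) (h : a < l.length) :
    (l.set a x).take (a + 1) = l.take a ++ [x] := by
  rw [List.set_eq_take_append_cons_drop, if_pos h, List.take_append]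
  simp [Nat.min_eq_left (Nat.le_of_lt h)]

lemma drop_set_high (l : List String) (x : String) (a m : Nat) (h : a < m) :
    (l.set a x).drop m = l.drop m := by
  rw [List.drop_set]
  simp; omega

lemma fillO_spec : ∀ (b : Nat) (ret : List String) (a : Nat), a + b ≤ ret.length →
    fillO ret a b = (ret.take a ++ List.replicate b "O" ++ ret.drop (a + b), a + b) := by
  intro b
  induction b with
  | zero => intro ret a h; simp [fillO]
  | succ n ih =>
    intro ret a h
    have ha : a < ret.length := by omega
    rw [fillO, ih (ret.set a "O") (a + 1) (by simp; omega),
      take_set_succ ret "O" a ha, drop_set_high ret "O" a (a + 1 + n) (by omega),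
      show a + 1 + n = a + (n + 1) from by omega]
    simp [List.replicate_succ]

lemma fillDotGo_spec : ∀ (k : Nat) (ret : List String) (a : Nat), a + k ≤ ret.length →
    fillDotGo ret a k = ret.take a ++ List.replicate k "." ++ ret.drop (a + k) := by
  intro k
  induction k with
  | zero => intro ret a h; simp [fillDotGo]
  | succ n ih =>
    intro ret a h
    have ha : a < ret.length := by omega
    rw [fillDotGo, ih (ret.set a ".") (a + 1) (by simp; omega),
      take_set_succ ret "." a ha, drop_set_high ret "." a (a + 1 + n) (by omega),
      show a + 1 + n = a + (n + 1) from by omega]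
    simp [List.replicate_succ]

lemma fillDot_spec (k : Nat) (ret : List String) (a : Nat) (h : a + k ≤ ret.length) :
    fillDot ret a (a + k) = ret.take a ++ List.replicate k "." ++ ret.drop (a + k) := by
  rw [fillDot, show a + k - a = k from by omega, fillDotGo_spec k ret a h]

lemma flushC_length (buf : List String) : (flushC buf).length = buf.length := by
  have := List.count_le_length (l := buf) (a := "O")
  simp [flushC]; omega

lemma flush_eq (out buf tail : List String) :
    fillDot (fillO (out ++ buf ++ tail) out.length (buf.count "O")).1
      (fillO (out ++ buf ++ tail) out.length (buf.count "O")).2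
      (out.length + buf.length)
    = out ++ flushC buf ++ tail := by
  have hc : buf.count "O" ≤ buf.length := List.count_le_length
  rw [fillO_spec _ _ _ (by simp; omega)]
  have h1 : (out ++ buf ++ tail).take out.length = out := by
    rw [List.append_assoc, List.take_left]
  have h2 : (out ++ buf ++ tail).drop (out.length + buf.count "O")
      = buf.drop (buf.count "O") ++ tail := by
    rw [List.append_assoc, List.drop_append,
      List.drop_eq_nil_of_le (Nat.le_add_right _ _), Nat.add_sub_cancel_left,
      List.drop_append_of_le_length hc, List.nil_append]
  rw [h1, h2,
    show out.length + buf.length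
      = out.length + buf.count "O" + (buf.length - buf.count "O") from by omega,
    fillDot_spec (buf.length - buf.count "O") _ (out.length + buf.count "O") (by simp; omega)]
  have h3 : (out ++ List.replicate (buf.count "O") "O"
        ++ (buf.drop (buf.count "O") ++ tail)).take (out.length + buf.count "O")
      = out ++ List.replicate (buf.count "O") "O" := by
    have hl : (out ++ List.replicate (buf.count "O") "O").length
        = out.length + buf.count "O" := by simp
    rw [← hl, List.take_left]
  have h4 : (out ++ List.replicate (buf.count "O") "O"
        ++ (buf.drop (buf.count "O") ++ tail)).drop
        (out.length + buf.count "O" + (buf.length - buf.count "O")) = tail := by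
    rw [← List.append_assoc]
    have hl : ((out ++ List.replicate (buf.count "O") "O") ++ buf.drop (buf.count "O")).length
        = out.length + buf.count "O" + (buf.length - buf.count "O") := by
      simp; omega
    rw [← hl, List.drop_left]
  rw [h3, h4]
  simp [flushC, List.append_assoc]

lemma go_eq (vec : List String) : ∀ (rest out buf : List String) (anchor : Int) (r : Nat),
    vec.drop r = rest →
    r = out.length + buf.length →
    (anchor + 1).toNat = out.length →
    tiltA_go vec (out ++ buf ++ rest) anchor (buf.count "O") r rest.length
      = tiltC out buf rest := by
  intro rest
  induction rest with
  | nil =>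
    intro out buf anchor r hdrop hr hanchor
    rw [List.length_nil, tiltA_go]
    simp only [hanchor, hr]
    simpa using flush_eq out buf []
  | cons c cs ih =>
    intro out buf anchor r hdrop hr hanchor
    have hlen1 := congrArg List.length hdrop
    simp at hlen1
    have hget : vec.getD r "" = c := by
      have h0 : vec[r + 0]? = some c := by
        rw [← List.getElem?_drop, hdrop]; rfl
      simp only [Nat.add_zero] at h0
      simp [List.getD_eq_getElem?_getD, h0]
    have hdrop1 : vec.drop (r + 1) = cs := by
      have h1 : (vec.drop r).drop 1 = cs := by rw [hdrop]; rfl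
      simpa [List.drop_drop] using h1
    rw [List.length_cons, tiltA_go, hget]
    by_cases hc : c = "#"
    · rw [if_pos hc]
      subst hc
      simp only [hanchor, hr]
      rw [flush_eq out buf ("#" :: cs)]
      have hrec := ih (out ++ flushC buf ++ ["#"]) [] (Int.ofNat (out.length + buf.length))
        (out.length + buf.length + 1)
        (by rw [← hr]; exact hdrop1)
        (by simp [flushC_length]; omega)
        (by simp [flushC_length]; omega)
      simp only [List.append_nil, List.append_assoc, List.singleton_append,
        List.count_nil] at hrec ⊢
      rw [hrec]
      simp [tiltC, List.append_assoc]
    · rw [if_neg hc]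
      by_cases ho : c = "O"
      · rw [if_pos ho]
        subst ho
        have hrec := ih out (buf ++ ["O"]) anchor (r + 1) hdrop1 (by simp; omega) hanchor
        have hcount : (buf ++ ["O"]).count "O" = buf.count "O" + 1 := by
          simp [List.count_append]
        rw [hcount] at hrec
        simp only [List.append_assoc, List.singleton_append, List.length_append,
          List.length_cons, List.length_nil] at hrec ⊢
        rw [hrec]
        simp [tiltC]
      · rw [if_neg ho]
        have hrec := ih out (buf ++ [c]) anchor (r + 1) hdrop1 (by simp; omega) hanchor
        have hcount : (buf ++ [c]).count "O" = buf.count "O" := by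
          simp [List.count_append, ho]
        rw [hcount] at hrec
        simp only [List.append_assoc, List.singleton_append, List.length_append,
          List.length_cons, List.length_nil] at hrec ⊢
        rw [hrec]
        simp [tiltC, hc]

-- first slot after `pre` is overwritten
lemma set_after (pre : List String) (x y : String) (tail : List String) :
    (pre ++ x :: tail).set pre.length y = pre ++ y :: tail := by
  induction pre with
  | nil => rfl
  | cons h t ih => simp [ih]

lemma repl_shift (d : Nat) (x : String) (t : List String) :
    List.replicate d x ++ x :: t = x :: (List.replicate d x ++ t) := by
  induction d with
  | zero => rfl
  | succ n ih => simp [List.replicate_succ, ih]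

lemma place_eq : ∀ (rest out buf : List String),
    placeGo (out ++ List.replicate (buf.count "O") "O"
        ++ List.replicate (buf.length - buf.count "O") "." ++ rest.map blankC)
      (out.length + buf.count "O") (out.length + buf.length) rest
    = tiltC out buf rest := by
  intro rest
  induction rest with
  | nil =>
    intro out buf
    simp [placeGo, tiltC, flushC, List.append_assoc]
  | cons c cs ih =>
    intro out buf
    have hc : buf.count "O" ≤ buf.length := List.count_le_length
    by_cases h1 : c = "#"
    · subst h1
      rw [placeGo, if_pos rfl, tiltC, if_pos rfl]
      refine Eq.trans ?_ (ih (out ++ flushC buf ++ ["#"]) [])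
      congr 1
      · simp [flushC, blankC, List.append_assoc]
      all_goals try simp only [List.length_append, List.length_cons, List.length_nil,
        flushC_length, List.count_nil]
    · by_cases h2 : c = "O"
      · subst h2
        rw [placeGo, if_neg (by decide), if_pos rfl, tiltC, if_neg (by decide)]
        have hmap : (("O" : String) :: cs).map blankC = "." :: cs.map blankC := by
          simp [blankC]
        have hshape : out ++ List.replicate (buf.count "O") "O"
            ++ List.replicate (buf.length - buf.count "O") "." ++ "." :: cs.map blankC
          = (out ++ List.replicate (buf.count "O") "O")
            ++ "." :: (List.replicate (buf.length - buf.count "O") "." ++ cs.map blankC) := by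
          simp [List.append_assoc, repl_shift]
        have hlen : (out ++ List.replicate (buf.count "O") "O").length
            = out.length + buf.count "O" := by simp
        rw [hmap, hshape, ← hlen, set_after]
        refine Eq.trans ?_ (ih out (buf ++ ["O"]))
        have hcnt : (buf ++ ["O"]).count "O" = buf.count "O" + 1 := by
          simp [List.count_append]
        congr 1
        · rw [hcnt]
          have hd : (buf ++ ["O"]).length - (buf.count "O" + 1)
              = buf.length - buf.count "O" := by simp
          rw [hd]
          simp [List.replicate_succ', List.append_assoc]
        all_goals try simp only [List.length_append, List.length_replicate, List.length_cons,
          List.length_nil, flushC_length, List.count_nil]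
        all_goals try rw [hcnt]
        all_goals try omega
      · rw [placeGo, if_neg h1, if_neg h2, tiltC, if_neg h1]
        have hmap : (c :: cs).map blankC = "." :: cs.map blankC := by
          simp [blankC, h1]
        rw [hmap]
        refine Eq.trans ?_ (ih out (buf ++ [c]))
        have hcnt : (buf ++ [c]).count "O" = buf.count "O" := by
          simp [List.count_append, h2]
        congr 1
        · rw [hcnt]
          have hd : (buf ++ [c]).length - buf.count "O"
              = (buf.length - buf.count "O") + 1 := by simp; omega
          rw [hd]
          simp [List.replicate_succ', List.append_assoc, repl_shift]
        all_goals try simp only [List.length_append, List.length_replicate, List.length_cons,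
          List.length_nil, flushC_length, List.count_nil]
        all_goals try rw [hcnt]
        all_goals try omega

-- ===== VERDICT (by name: the statement is the Claim_ definition above) =====
theorem tilt_vec_spec : Claim_equal_tilt_vec := by
  unfold Claim_equal_tilt_vec Spec_tilt_vec tilt_vec tilt_vec_alt
  intro vec _
  have hA : tiltA_go vec vec (-1) 0 0 vec.length = tiltC [] [] vec := by
    simpa using go_eq vec vec [] [] (-1) 0 rfl rfl rfl
  have hB : placeGo (vec.map blankC) 0 0 vec = tiltC [] [] vec := by
    simpa using place_eq vec [] []
  rw [hA, hB]
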